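-- pv_equiv track=rewrite | github.com/petergaultney/eldrow | scripts/inspect_elims.py | yield_guesses
-- ===== SOURCE A (Python) =====
-- import typing as ty
-- from itertools import product
--
-- def yield_guesses(word: str) -> ty.Iterator[tuple[str, ...]]:
--     for markers in product("_yg", repeat=len(word)):
--         w = ""
--         for marker, letter in zip(markers, word):
--             if marker == "_":
--                 w += letter.lower()
--             elif marker == "y":
--                 w += "." + letter.lower()
--             else:
--                 w += letter.upper()
--         yield (w,)
-- ===== SOURCE B (Python) =====
-- def yield_guesses(word):
--     def walk(prefix, i):
--         if i == len(word):
--             yield (prefix,)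
--             return
--         letter = word[i]
--         yield from walk(prefix + letter.lower(), i + 1)
--         yield from walk(prefix + "." + letter.lower(), i + 1)
--         yield from walk(prefix + letter.upper(), i + 1)
--     yield from walk("", 0)
-- ===== Notes on version B (the rewrite author's own statement) =====
-- stated objective: alternative
-- what changed: Replaced the itertools.product enumeration of all marker tuples plus a zip-fold string build with a recursive backtracking walk over the word positions that carries the accumulated prefix and tries the three markers in place.
import Mathlib
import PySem

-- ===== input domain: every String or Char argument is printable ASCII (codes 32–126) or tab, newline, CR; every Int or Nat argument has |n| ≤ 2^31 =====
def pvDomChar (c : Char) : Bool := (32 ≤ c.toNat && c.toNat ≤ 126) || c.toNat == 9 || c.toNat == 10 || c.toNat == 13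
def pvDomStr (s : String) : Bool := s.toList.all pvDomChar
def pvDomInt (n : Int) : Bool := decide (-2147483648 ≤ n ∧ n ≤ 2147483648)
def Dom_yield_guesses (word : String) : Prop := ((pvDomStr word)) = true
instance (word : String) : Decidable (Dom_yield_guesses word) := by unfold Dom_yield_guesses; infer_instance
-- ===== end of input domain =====

-- B replaces the itertools.product enumeration + zip-fold of A by a recursive
-- position-by-position backtracking walk carrying the accumulated prefix (objective: alternative).

-- ===== PORT A =====
-- product("_yg", repeat=n): first position varies slowest, markers in order '_','y','g'
def pvMarkerProd : Nat → List (List Char)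
  | 0 => [[]]
  | n + 1 => ['_', 'y', 'g'].flatMap (fun m => (pvMarkerProd n).map (fun ms => m :: ms))

-- the inner loop of A: w += letter.lower() / "." + letter.lower() / letter.upper()
def pvStep (w : List Char) (p : Char × Char) : List Char :=
  if p.1 == '_' then w ++ PySem.Chars.lower [p.2]
  else if p.1 == 'y' then w ++ '.' :: PySem.Chars.lower [p.2]
  else w ++ PySem.Chars.upper [p.2]

def yield_guesses (word : String) : List (List String) :=
  (pvMarkerProd word.toList.length).map
    (fun ms => [String.mk ((ms.zip word.toList).foldl pvStep [])])

-- ===== PORT B =====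
def pvWalk (pre : List Char) : List Char → List (List String)
  | [] => [[String.mk pre]]
  | c :: cs =>
      pvWalk (pre ++ PySem.Chars.lower [c]) cs ++
      pvWalk (pre ++ '.' :: PySem.Chars.lower [c]) cs ++
      pvWalk (pre ++ PySem.Chars.upper [c]) cs

def yield_guesses_alt (word : String) : List (List String) :=
  pvWalk [] word.toList

-- ===== PRECONDITION & SPEC =====
def Spec_yield_guesses (word : String) (out : List (List String)) : Prop := out = yield_guesses_alt word
instance (word : String) (out : List (List String)) : Decidable (Spec_yield_guesses word out) := by unfold Spec_yield_guesses; infer_instance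

-- ===== CLAIM (what is proved, stated in full; the proofs are below) =====
def Claim_equal_yield_guesses : Prop := ∀ (word : String), Dom_yield_guesses word → Spec_yield_guesses word (yield_guesses word)

-- ===== LEMMAS AND PROOFS =====
theorem pv_key (cs : List Char) : ∀ pre : List Char,
    (pvMarkerProd cs.length).map
      (fun ms => [String.mk ((ms.zip cs).foldl pvStep pre)]) = pvWalk pre cs := by
  induction cs with
  | nil => intro pre; simp [pvMarkerProd, pvWalk]
  | cons c cs ih =>
      intro pre
      simp only [List.length_cons, pvMarkerProd, List.flatMap_cons, List.flatMap_nil,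
        List.map_append, List.map_map, List.append_nil, pvWalk]
      have h : ∀ m : Char,
          ((pvMarkerProd cs.length).map
            ((fun ms => [String.mk ((ms.zip (c :: cs)).foldl pvStep pre)]) ∘
              fun ms => m :: ms)) =
          (pvMarkerProd cs.length).map
            (fun ms => [String.mk ((ms.zip cs).foldl pvStep (pvStep pre (m, c)))]) := by
        intro m
        apply List.map_congr_left
        intro ms _
        simp [Function.comp, List.zip_cons_cons]
      rw [h '_', h 'y', h 'g', ih, ih, ih]
      simp [pvStep]

-- ===== VERDICT (by name: the statement is the Claim_ definition above) =====
theorem yield_guesses_spec : Claim_equal_yield_guesses := by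
  intro word _
  unfold Spec_yield_guesses yield_guesses yield_guesses_alt
  exact pv_key word.toList []
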